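-- pv_equiv track=rewrite | github.com/bidulgi123/Algorithm | 프로그래머스/1/258712. 가장 많이 받은 선물/가장 많이 받은 선물.py | solution
-- ===== SOURCE A (Python) =====
-- def solution(friends, gifts):
--     answer = 0
--     table = {x: {y: 0 for y in friends if y != x} for x in friends}
--     gift_power = {i : 0 for i in friends}
--
--     for detail in gifts :
--         send, get = detail.split(" ")
--         table[send][get] += 1
--         gift_power[send] +=1
--         gift_power[get] -=1
--
--
--     for name in friends :
--         middle = 0
--         for bigyo in table[name].keys():
--
--             if table[name][bigyo] > table[bigyo][name]:
--                 middle +=1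
--             elif table[name][bigyo] == table[bigyo][name]:
--                 if gift_power[name] > gift_power[bigyo] :
--                     middle +=1
--                 else :
--                     continue
--             else :
--                 continue
--
--         if middle > answer :
--             answer = middle
--
--     return answer
-- ===== SOURCE B (Python) =====
-- def solution(friends, gifts):
--     uniq = list(dict.fromkeys(friends))
--     power = dict.fromkeys(uniq, 0)
--     cnt = {}
--     for g in gifts:
--         s, r = g.split(" ")
--         cnt[(s, r)] = cnt.get((s, r), 0) + 1
--         power[s] += 1
--         power[r] -= 1
--     # Base score from the gift-power ranking alone: a friend's score starts as the
--     # number of friends with strictly smaller gift power (correct for every pair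
--     # that exchanged no gifts), computed from a sorted frequency table.
--     freq = {}
--     for f in uniq:
--         freq[power[f]] = freq.get(power[f], 0) + 1
--     below = {}
--     acc = 0
--     for v in sorted(freq):
--         below[v] = acc
--         acc += freq[v]
--     score = {f: below[power[f]] for f in uniq}
--     # Correct only the pairs that actually exchanged gifts: undo the power-ranking
--     # point and award the point by the real rule (more gifts sent, power tiebreak).
--     touched = dict.fromkeys((a, b) if a < b else (b, a) for (a, b) in cnt)
--     for a, b in touched:
--         pa, pb = power[a], power[b]
--         ab, ba = cnt.get((a, b), 0), cnt.get((b, a), 0)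
--         if pa > pb:
--             score[a] -= 1
--         elif pb > pa:
--             score[b] -= 1
--         if ab > ba or (ab == ba and pa > pb):
--             score[a] += 1
--         elif ba > ab or (ab == ba and pb > pa):
--             score[b] += 1
--     return max(score.values(), default=0)
-- ===== Notes on version B (the rewrite author's own statement) =====
-- stated objective: alternative
-- what changed: Replaces A's all-pairs head-to-head scan with a ranking algorithm: every friend's base score is read off a sorted cumulative frequency table of gift powers (number of friends with strictly smaller power, correct for every pair that exchanged no gifts), and only the pairs that actually exchanged gifts are then corrected by undoing the power-ranking point and awarding the real one; A instead compares every ordered pair of friends through an n x n nested table.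
import Mathlib
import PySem

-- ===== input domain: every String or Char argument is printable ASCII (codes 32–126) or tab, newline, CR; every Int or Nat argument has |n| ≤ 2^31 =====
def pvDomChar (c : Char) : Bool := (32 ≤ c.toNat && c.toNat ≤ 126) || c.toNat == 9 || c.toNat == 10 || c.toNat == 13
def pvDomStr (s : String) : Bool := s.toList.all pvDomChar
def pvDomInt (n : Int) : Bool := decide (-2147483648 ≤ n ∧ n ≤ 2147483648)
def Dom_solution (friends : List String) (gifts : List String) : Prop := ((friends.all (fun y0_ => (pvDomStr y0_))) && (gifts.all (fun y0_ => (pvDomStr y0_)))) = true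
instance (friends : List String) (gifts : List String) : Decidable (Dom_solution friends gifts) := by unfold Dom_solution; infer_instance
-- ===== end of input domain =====

-- B replaces A's all-pairs comparison by a ranking algorithm: a sorted cumulative frequency
-- table of gift powers gives every friend a base score (friends beaten on gift power alone,
-- which is the right answer for every pair that exchanged no gifts), and only the pairs that
-- actually exchanged gifts are then corrected (objective: alternative algorithm).

-- ===== PORT A =====
-- the body of A's 'for detail in gifts' loop, split into its two independent dict updates
def pvStepT (t : PySem.Dict String (PySem.Dict String Int)) (detail : String) :
    PySem.Dict String (PySem.Dict String Int) :=
  let parts := (PySem.Str.split? detail " ").getD []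
  let send := parts.getD 0 ""
  let get := parts.getD 1 ""
  let inner := t.getD send PySem.Dict.empty
  t.insert send (inner.insert get (inner.getD get 0 + 1))

def pvStepP (gp : PySem.Dict String Int) (detail : String) : PySem.Dict String Int :=
  let parts := (PySem.Str.split? detail " ").getD []
  let send := parts.getD 0 ""
  let get := parts.getD 1 ""
  let gp1 := gp.insert send (gp.getD send 0 + 1)
  gp1.insert get (gp1.getD get 0 - 1)

def pvTable0 (friends : List String) : PySem.Dict String (PySem.Dict String Int) :=
  friends.foldl (fun t x =>
    t.insert x (friends.foldl (fun inner y =>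
      if y ≠ x then inner.insert y 0 else inner) PySem.Dict.empty)) PySem.Dict.empty

def pvPower0 (friends : List String) : PySem.Dict String Int :=
  friends.foldl (fun d i => d.insert i 0) PySem.Dict.empty

def solution (friends : List String) (gifts : List String) : Int :=
  let st := gifts.foldl (fun st detail => (pvStepT st.1 detail, pvStepP st.2 detail))
    (pvTable0 friends, pvPower0 friends)
  friends.foldl (fun answer name =>
    let middle := (st.1.getD name PySem.Dict.empty).keys.foldl (fun middle bigyo =>
      if (st.1.getD name PySem.Dict.empty).getD bigyo 0 >
         (st.1.getD bigyo PySem.Dict.empty).getD name 0 then middle + 1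
      else if (st.1.getD name PySem.Dict.empty).getD bigyo 0 =
              (st.1.getD bigyo PySem.Dict.empty).getD name 0 then
        (if st.2.getD name 0 > st.2.getD bigyo 0 then middle + 1 else middle)
      else middle) (0 : Int)
    if middle > answer then middle else answer) 0


-- ===== PORT B =====
-- Source B's 'for g in gifts' loop body: the pair counter update and the power update (pvStepP)
def pvStepCnt (c : PySem.Dict (String × String) Int) (g : String) :
    PySem.Dict (String × String) Int :=
  let parts := (PySem.Str.split? g " ").getD []
  let s := parts.getD 0 ""
  let r := parts.getD 1 ""
  c.insert (s, r) (c.getD (s, r) 0 + 1)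

-- Source B's 'for a, b in touched' loop body: undo the power-ranking point, award the real one
def pvCorrect (cnt : PySem.Dict (String × String) Int) (power : PySem.Dict String Int)
    (sc : PySem.Dict String Int) (p : String × String) : PySem.Dict String Int :=
  let a := p.1
  let b := p.2
  let pa := power.getD a 0
  let pb := power.getD b 0
  let ab := cnt.getD (a, b) 0
  let ba := cnt.getD (b, a) 0
  let sc1 := if pa > pb then sc.insert a (sc.getD a 0 - 1)
             else if pb > pa then sc.insert b (sc.getD b 0 - 1)
             else sc
  if ab > ba ∨ (ab = ba ∧ pa > pb) then sc1.insert a (sc1.getD a 0 + 1)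
  else if ba > ab ∨ (ab = ba ∧ pb > pa) then sc1.insert b (sc1.getD b 0 + 1)
  else sc1

def solution_alt (friends : List String) (gifts : List String) : Int :=
  let uniq := PySem.List.dedup friends
  let power0 := uniq.foldl (fun (d : PySem.Dict String Int) f => d.insert f 0) PySem.Dict.empty
  let st := gifts.foldl (fun st g => (pvStepCnt st.1 g, pvStepP st.2 g))
    ((PySem.Dict.empty : PySem.Dict (String × String) Int), power0)
  let cnt := st.1
  let power := st.2
  let freq := uniq.foldl (fun (d : PySem.Dict Int Int) f =>
    d.insert (power.getD f 0) (d.getD (power.getD f 0) 0 + 1)) PySem.Dict.empty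
  let ba := (PySem.List.sorted freq.keys (fun v => v) false).foldl
    (fun (p : PySem.Dict Int Int × Int) v => (p.1.insert v p.2, p.2 + freq.getD v 0))
    (PySem.Dict.empty, 0)
  let below := ba.1
  let score0 := uniq.foldl (fun (d : PySem.Dict String Int) f =>
    d.insert f (below.getD (power.getD f 0) 0)) PySem.Dict.empty
  let touched := PySem.List.dedup (cnt.keys.map (fun p => if p.1 < p.2 then p else (p.2, p.1)))
  let score := touched.foldl (pvCorrect cnt power) score0
  PySem.List.maxD score.values (fun v => v) 0


-- ===== PRECONDITION & SPEC =====
-- Pre_ excludes exactly the inputs on which A raises: a gift that does not split on " "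
-- into exactly two parts (ValueError on unpacking), or whose two parts are not two
-- distinct members of friends (KeyError in table/gift_power).
def Pre_solution (friends : List String) (gifts : List String) : Prop :=
  ∀ g ∈ gifts,
    ((PySem.Str.split? g " ").getD []).length = 2 ∧
    ((PySem.Str.split? g " ").getD []).getD 0 "" ∈ friends ∧
    ((PySem.Str.split? g " ").getD []).getD 1 "" ∈ friends ∧
    ((PySem.Str.split? g " ").getD []).getD 0 "" ≠ ((PySem.Str.split? g " ").getD []).getD 1 ""
instance (friends : List String) (gifts : List String) : Decidable (Pre_solution friends gifts) := by
  unfold Pre_solution; infer_instance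

def pvWitness_solution : List String × List String := (["muzi", "ryan"], ["muzi ryan"])

def Spec_solution (friends : List String) (gifts : List String) (out : Int) : Prop := out = solution_alt friends gifts
instance (friends : List String) (gifts : List String) (out : Int) : Decidable (Spec_solution friends gifts out) := by unfold Spec_solution; infer_instance

-- ===== CLAIM (what is proved, stated in full; the proofs are below) =====
def Claim_equal_solution : Prop := ∀ (friends : List String) (gifts : List String), Dom_solution friends gifts → Pre_solution friends gifts → Spec_solution friends gifts (solution friends gifts)

-- ===== LEMMAS AND PROOFS =====

def pvParse (g : String) : String × String :=
  (((PySem.Str.split? g " ").getD []).getD 0 "", ((PySem.Str.split? g " ").getD []).getD 1 "")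

def pvC (gifts : List String) (a b : String) : Int := ((gifts.map pvParse).count (a, b) : Int)

def pvPw (gifts : List String) (x : String) : Int :=
  (((gifts.map pvParse).countP (fun p => p.1 == x) : Int)) -
  (((gifts.map pvParse).countP (fun p => p.2 == x) : Int))

abbrev pvW (gifts : List String) (a b : String) : Prop :=
  pvC gifts a b > pvC gifts b a ∨ (pvC gifts a b = pvC gifts b a ∧ pvPw gifts a > pvPw gifts b)

-- touched relation: the pair exchanged at least one gift in some direction
abbrev pvT (gifts : List String) (a b : String) : Prop :=
  0 < pvC gifts a b ∨ 0 < pvC gifts b a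

-- === power fold ===
theorem pv_stepP_getD (gp : PySem.Dict String Int) (g : String) (x : String) :
    (pvStepP gp g).getD x 0 =
      gp.getD x 0 + (if (pvParse g).1 = x then 1 else 0) + (if (pvParse g).2 = x then -1 else 0) := by
  simp only [pvStepP, pvParse, PySem.Dict.getD_insert]
  split_ifs <;> subst_vars <;> simp_all <;> omega

theorem pv_pw_cons (g : String) (gifts : List String) (x : String) :
    pvPw (g :: gifts) x =
      (if (pvParse g).1 = x then 1 else 0) + (if (pvParse g).2 = x then -1 else 0) + pvPw gifts x := by
  simp only [pvPw, List.map_cons, List.countP_cons]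
  by_cases h1 : (pvParse g).1 = x <;> by_cases h2 : (pvParse g).2 = x <;>
    simp [h1, h2] <;> push_cast <;> ring

theorem pv_pow_fold (gifts : List String) :
    ∀ (gp : PySem.Dict String Int) (x : String),
      (gifts.foldl pvStepP gp).getD x 0 = gp.getD x 0 + pvPw gifts x := by
  induction gifts with
  | nil => intro gp x; simp [pvPw]
  | cons g rest ih =>
    intro gp x
    simp only [List.foldl_cons]
    rw [ih, pv_stepP_getD, pv_pw_cons]
    ring

-- === cnt fold (B) ===
theorem pv_cnt_fold (gifts : List String) (c : PySem.Dict (String × String) Int) (q : String × String) :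
    (gifts.foldl pvStepCnt c).getD q 0 = c.getD q 0 + ((gifts.map pvParse).count q : Int) := by
  have h := PySem.Dict.getD_foldl_insert_add_one (gifts.map pvParse) c q
  rw [List.foldl_map] at h
  exact h

theorem pv_cnt_keys (gifts : List String) :
    (gifts.foldl pvStepCnt PySem.Dict.empty).keys = PySem.Set.ofList (gifts.map pvParse) := by
  have : gifts.foldl pvStepCnt PySem.Dict.empty =
      gifts.foldl (fun c g => c.insert (pvParse g) (c.getD (pvParse g) 0 + 1)) PySem.Dict.empty := rfl
  rw [this, PySem.Dict.keys_foldl_insert_key, PySem.Dict.keys_empty, PySem.Set.update_nil_left]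

-- === table fold (A) ===
theorem pv_stepT_getD (t : PySem.Dict String (PySem.Dict String Int)) (g : String) (x y : String) :
    ((pvStepT t g).getD x PySem.Dict.empty).getD y 0 =
      (t.getD x PySem.Dict.empty).getD y 0 + (if pvParse g = (x, y) then 1 else 0) := by
  simp only [pvStepT, pvParse, PySem.Dict.getD_insert, Prod.mk.injEq]
  split_ifs <;> subst_vars <;> simp_all [PySem.Dict.getD_insert] <;>
    (try split_ifs <;> simp_all)
  all_goals first | omega | (intro h; subst h; simp_all)

theorem pv_table_fold (gifts : List String) :
    ∀ (t : PySem.Dict String (PySem.Dict String Int)) (x y : String),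
      (((gifts.foldl pvStepT t).getD x PySem.Dict.empty).getD y 0) =
        ((t.getD x PySem.Dict.empty).getD y 0) + pvC gifts x y := by
  induction gifts with
  | nil => intro t x y; simp [pvC]
  | cons g rest ih =>
    intro t x y
    simp only [List.foldl_cons]
    rw [ih, pv_stepT_getD]
    simp only [pvC, List.map_cons, List.count_cons]
    by_cases h : pvParse g = (x, y) <;> simp [h] <;> push_cast <;> ring

theorem pvW_irrefl (gifts : List String) (a : String) : ¬ pvW gifts a a := by
  unfold pvW; omega

-- === build-by-insert dict lookups ===
theorem pv_getD_foldl_insert {ν : Type} (l : List String) (F : String → ν) (dflt : ν) :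
    ∀ (d : PySem.Dict String ν) (q : String),
      (l.foldl (fun t x => t.insert x (F x)) d).getD q dflt =
        if q ∈ l then F q else d.getD q dflt := by
  induction l with
  | nil => intro d q; simp
  | cons x xs ih =>
    intro d q
    simp only [List.foldl_cons, ih, PySem.Dict.getD_insert, List.mem_cons]
    by_cases h1 : q ∈ xs <;> by_cases h2 : q = x <;> simp [h1, h2]

theorem pv_inner0_getD_zero (l : List String) (x : String) :
    ∀ (d : PySem.Dict String Int) (q : String), d.getD q 0 = 0 →
      ((l.foldl (fun i y => if y ≠ x then i.insert y 0 else i) d).getD q 0) = 0 := by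
  induction l with
  | nil => intro d q h; simpa using h
  | cons y ys ih =>
    intro d q h
    simp only [List.foldl_cons]
    apply ih
    by_cases hy : y ≠ x
    · simp only [if_pos hy, PySem.Dict.getD_insert]; split_ifs <;> simp [h]
    · simpa [hy] using h

-- === keys of the comprehension dicts ===
theorem pv_filter_discard (s : List String) (p : String → Bool) (x : String) (hx : p x = false) :
    (PySem.Set.discard s x).filter p = s.filter p := by
  simp only [PySem.Set.discard, List.filter_filter]
  apply List.filter_congr
  intro y _
  by_cases hyx : y = x
  · subst hyx; simp [hx]
  · simp [hyx]

theorem pv_ofList_filter (l : List String) (p : String → Bool) :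
    PySem.Set.ofList (l.filter p) = (PySem.Set.ofList l).filter p := by
  induction l with
  | nil => simp [PySem.Set.ofList_nil]
  | cons x xs ih =>
    by_cases hp : p x
    · rw [List.filter_cons_of_pos hp, PySem.Set.ofList_cons, PySem.Set.ofList_cons,
        List.filter_cons_of_pos hp, ih]
      simp only [PySem.Set.discard, List.filter_filter]
      congr 1
      apply List.filter_congr
      intro y _; rw [Bool.and_comm]
    · rw [List.filter_cons_of_neg (by simp [hp]), PySem.Set.ofList_cons,
        List.filter_cons_of_neg (by simp [hp]), ih, pv_filter_discard _ _ _ (by simpa using hp)]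

theorem pv_inner0_keys (friends : List String) (x : String) :
    (friends.foldl (fun i y => if y ≠ x then i.insert y 0 else i)
        (PySem.Dict.empty : PySem.Dict String Int)).keys =
      (PySem.Set.ofList friends).filter (fun b => decide (b ≠ x)) := by
  rw [PySem.List.foldl_ite_eq_foldl_filter (p := fun y => y ≠ x) (f := fun (i : PySem.Dict String Int) y => i.insert y 0)]
  rw [PySem.Dict.keys_foldl_insert (f := fun _ _ => (0 : Int))]
  rw [PySem.Dict.keys_empty, PySem.Set.update_nil_left, pv_ofList_filter]

theorem pv_table_keys_fold (friends : List String) (gifts : List String)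
    (hg : ∀ g ∈ gifts, (pvParse g).1 ∈ friends ∧ (pvParse g).2 ∈ friends ∧
          (pvParse g).1 ≠ (pvParse g).2) :
    ∀ t : PySem.Dict String (PySem.Dict String Int),
      t.keys = PySem.Set.ofList friends →
      (∀ x ∈ friends, (t.getD x PySem.Dict.empty).keys =
        (PySem.Set.ofList friends).filter (fun b => decide (b ≠ x))) →
      (∀ x ∈ friends, ((gifts.foldl pvStepT t).getD x PySem.Dict.empty).keys =
        (PySem.Set.ofList friends).filter (fun b => decide (b ≠ x))) := by
  induction gifts with
  | nil => intro t _ h2; simpa using h2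
  | cons g rest ih =>
    intro t h1 h2
    obtain ⟨hs, hr, hne⟩ := hg g (by simp)
    simp only [List.foldl_cons]
    have hcont : t.contains (pvParse g).1 = true := by
      rw [PySem.Dict.contains_iff_mem_keys, h1, PySem.Set.mem_ofList]; exact hs
    have hstep : pvStepT t g = t.insert (pvParse g).1
        ((t.getD (pvParse g).1 PySem.Dict.empty).insert (pvParse g).2
          ((t.getD (pvParse g).1 PySem.Dict.empty).getD (pvParse g).2 0 + 1)) := rfl
    apply ih (fun g' hg' => hg g' (by simp [hg']))
    · rw [hstep, PySem.Dict.keys_insert_of_contains _ _ hcont, h1]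
    · intro x hx
      rw [hstep, PySem.Dict.getD_insert]
      by_cases hxs : x = (pvParse g).1
      · subst hxs
        rw [if_pos rfl]
        rw [PySem.Dict.keys_insert_of_contains]
        · exact h2 _ hs
        · rw [PySem.Dict.contains_iff_mem_keys, h2 _ hs, List.mem_filter]
          exact ⟨by rw [PySem.Set.mem_ofList]; exact hr, by simpa using hne.symm⟩
      · rw [if_neg hxs]; exact h2 _ hx

-- === counting helpers ===
theorem pv_countP_or_disjoint {α : Type} (l : List α) (p q : α → Bool)
    (h : ∀ x ∈ l, ¬(p x = true ∧ q x = true)) :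
    l.countP (fun x => p x || q x) = l.countP p + l.countP q := by
  induction l with
  | nil => simp
  | cons a t ih =>
    simp only [List.countP_cons]
    rw [ih (fun x hx => h x (by simp [hx]))]
    have := h a (by simp)
    by_cases hp : p a <;> by_cases hq : q a <;> simp_all <;> omega

theorem pv_countP_add_pointwise {α : Type} (l : List α) (p q r s : α → Bool)
    (h : ∀ x ∈ l, ((if p x then 1 else 0) + (if q x then 1 else 0) : Nat) =
                  (if r x then 1 else 0) + (if s x then 1 else 0)) :
    l.countP p + l.countP q = l.countP r + l.countP s := by
  induction l with
  | nil => simp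
  | cons a t ih =>
    simp only [List.countP_cons]
    have h1 := h a (by simp)
    have h2 := ih (fun x hx => h x (by simp [hx]))
    by_cases hp : p a <;> by_cases hq : q a <;> by_cases hr : r a <;> by_cases hs : s a <;>
      simp_all <;> omega

-- === middle fold (A's inner loop) ===
theorem pv_middle_fold (L : List String) (c1 c2 q : String → Int) (pn : Int) :
    L.foldl (fun m b => if c1 b > c2 b then m + 1
      else if c1 b = c2 b then (if pn > q b then m + 1 else m) else m) 0
      = ((L.countP (fun b => decide (c1 b > c2 b ∨ (c1 b = c2 b ∧ pn > q b)))) : Int) := by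
  rw [PySem.List.foldl_congr_mem L _
    (fun m b => if c1 b > c2 b ∨ (c1 b = c2 b ∧ pn > q b) then m + 1 else m) 0
    (fun m b _ => by
      change _ = if c1 b > c2 b ∨ (c1 b = c2 b ∧ pn > q b) then m + 1 else m
      split_ifs <;> omega)]
  rw [PySem.List.foldl_ite_add_one]
  simp

-- === glue for the folds' results ===
def pvScore (friends gifts : List String) (f : String) : Int :=
  (((PySem.Set.ofList friends).countP (fun b => decide (pvW gifts f b))) : Int)

theorem pv_table0_getD_zero (friends : List String) (x y : String) :
    ((pvTable0 friends).getD x PySem.Dict.empty).getD y 0 = 0 := by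
  unfold pvTable0
  rw [pv_getD_foldl_insert friends
    (fun x => friends.foldl (fun (inner : PySem.Dict String Int) y =>
      if y ≠ x then inner.insert y 0 else inner) PySem.Dict.empty) PySem.Dict.empty]
  split_ifs
  · exact pv_inner0_getD_zero friends x PySem.Dict.empty y (by simp [PySem.Dict.getD_empty])
  · simp [PySem.Dict.getD_empty]

theorem pv_power0_getD_zero (friends : List String) (x : String) :
    (pvPower0 friends).getD x 0 = 0 := by
  unfold pvPower0
  rw [pv_getD_foldl_insert friends (fun _ => (0 : Int)) 0]
  split_ifs <;> simp [PySem.Dict.getD_empty]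

theorem pv_table0_keys (friends : List String) :
    (pvTable0 friends).keys = PySem.Set.ofList friends := by
  unfold pvTable0
  rw [PySem.Dict.keys_foldl_insert, PySem.Dict.keys_empty, PySem.Set.update_nil_left]

theorem pv_table0_inner_keys (friends : List String) (x : String) (hx : x ∈ friends) :
    ((pvTable0 friends).getD x PySem.Dict.empty).keys =
      (PySem.Set.ofList friends).filter (fun b => decide (b ≠ x)) := by
  unfold pvTable0
  rw [pv_getD_foldl_insert friends
    (fun x => friends.foldl (fun (inner : PySem.Dict String Int) y =>
      if y ≠ x then inner.insert y 0 else inner) PySem.Dict.empty) PySem.Dict.empty, if_pos hx]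
  exact pv_inner0_keys friends x

theorem pv_tF_getD (friends gifts : List String) (x y : String) :
    ((gifts.foldl pvStepT (pvTable0 friends)).getD x PySem.Dict.empty).getD y 0 =
      pvC gifts x y := by
  rw [pv_table_fold, pv_table0_getD_zero, zero_add]

theorem pv_pF_getD (friends gifts : List String) (x : String) :
    (gifts.foldl pvStepP (pvPower0 friends)).getD x 0 = pvPw gifts x := by
  rw [pv_pow_fold, pv_power0_getD_zero, zero_add]

theorem pv_foldl_max_zero_eq (L1 L2 : List Int) (h : ∀ x, x ∈ L1 ↔ x ∈ L2) :
    L1.foldl max 0 = L2.foldl max 0 := by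
  apply le_antisymm
  · rcases PySem.List.foldl_max_mem L1 0 with h0 | hm
    · rw [h0]; exact (PySem.List.le_foldl_max L2 0).1
    · exact (PySem.List.le_foldl_max L2 0).2 _ ((h _).mp hm)
  · rcases PySem.List.foldl_max_mem L2 0 with h0 | hm
    · rw [h0]; exact (PySem.List.le_foldl_max L1 0).1
    · exact (PySem.List.le_foldl_max L1 0).2 _ ((h _).mpr hm)

-- A equals: max over friends of the number of friends they out-gift
theorem pv_A_eq (friends gifts : List String)
    (hg : ∀ g ∈ gifts, (pvParse g).1 ∈ friends ∧ (pvParse g).2 ∈ friends ∧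
          (pvParse g).1 ≠ (pvParse g).2) :
    solution friends gifts = (friends.map (pvScore friends gifts)).foldl max 0 := by
  have hKeys := pv_table_keys_fold friends gifts hg (pvTable0 friends) (pv_table0_keys friends)
    (fun x hx => pv_table0_inner_keys friends x hx)
  unfold solution
  simp only []
  rw [PySem.List.foldl_prod_mk (f := pvStepT) (g := pvStepP)]
  simp only []
  rw [PySem.List.foldl_congr_mem friends _
    (fun ans name => max ans (pvScore friends gifts name)) 0 ?_]
  · rw [List.foldl_map]
  · intro acc x hx
    simp only []
    rw [hKeys x hx]
    rw [pv_middle_fold ((PySem.Set.ofList friends).filter (fun b => decide (b ≠ x)))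
      (fun b => ((gifts.foldl pvStepT (pvTable0 friends)).getD x PySem.Dict.empty).getD b 0)
      (fun b => ((gifts.foldl pvStepT (pvTable0 friends)).getD b PySem.Dict.empty).getD x 0)
      (fun b => (gifts.foldl pvStepP (pvPower0 friends)).getD b 0)
      ((gifts.foldl pvStepP (pvPower0 friends)).getD x 0)]
    rw [List.countP_filter]
    rw [List.countP_congr (q := fun b => decide (pvW gifts x b)) (fun b _ => by
      simp only [Bool.and_eq_true, decide_eq_true_eq]
      rw [pv_tF_getD, pv_tF_getD, pv_pF_getD, pv_pF_getD]
      constructor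
      · rintro ⟨h, -⟩; exact h
      · intro h; exact ⟨h, fun heq => pvW_irrefl gifts x (heq ▸ h)⟩)]
    have hmax : ∀ m v : Int, (if v > m then v else m) = max m v := by
      intro m v
      by_cases h : v > m
      · rw [if_pos h, max_eq_right (le_of_lt h)]
      · rw [if_neg h, max_eq_left (not_lt.mp h)]
    rw [pvScore, hmax]

-- === B-side lemmas ===

-- the fold over a list not containing v leaves key v alone
theorem pv_below_preserve (FR : Int → Int) :
    ∀ (l : List Int) (d : PySem.Dict Int Int) (acc : Int) (v : Int), v ∉ l →
      ((l.foldl (fun (p : PySem.Dict Int Int × Int) v =>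
          (p.1.insert v p.2, p.2 + FR v)) (d, acc)).1).getD v 0 = d.getD v 0 := by
  intro l
  induction l with
  | nil => intro d acc v _; rfl
  | cons w t ih =>
    intro d acc v hv
    simp only [List.foldl_cons]
    rw [ih _ _ _ (fun h => hv (by simp [h]))]
    rw [PySem.Dict.getD_insert, if_neg (fun h => hv (by simp [h]))]

-- the 'below' fold: cumulative counts over the strictly-sorted value list
theorem pv_below_fold (M : List Int) (FR : Int → Int) (hFR : ∀ v, FR v = ((M.count v : Int))) :
    ∀ (suffix done : List Int) (d : PySem.Dict Int Int) (acc : Int),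
      (done ++ suffix).Pairwise (· < ·) →
      (∀ x ∈ M, x ∈ done ++ suffix) →
      acc = ((M.countP (fun x => decide (x ∈ done))) : Int) →
      ∀ v ∈ suffix,
        ((suffix.foldl (fun (p : PySem.Dict Int Int × Int) v =>
            (p.1.insert v p.2, p.2 + FR v)) (d, acc)).1).getD v 0 =
          ((M.countP (fun x => decide (x < v))) : Int) := by
  intro suffix
  induction suffix with
  | nil => intro done d acc _ _ _ v hv; simp at hv
  | cons v0 rest ih =>
    intro done d acc hpw hall hacc v hv
    obtain ⟨hpd, hpr, hcross⟩ := List.pairwise_append.mp hpw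
    have hdlt : ∀ x ∈ done, x < v0 := fun x hx => hcross x hx v0 (by simp)
    have hv0rest : ∀ x ∈ rest, v0 < x := (List.pairwise_cons.mp hpr).1
    have hv0done : v0 ∉ done := fun hh => lt_irrefl v0 (hdlt v0 hh)
    have hmemiff : ∀ x ∈ M, (x ∈ done ↔ x < v0) := by
      intro x hxM
      constructor
      · exact hdlt x
      · intro hlt
        rcases List.mem_append.mp (hall x hxM) with h | h
        · exact h
        · rcases List.mem_cons.mp h with rfl | h
          · exact absurd hlt (lt_irrefl x)
          · exact absurd hlt (not_lt.mpr (le_of_lt (hv0rest x h)))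
    have hacc' : acc + FR v0 = ((M.countP (fun x => decide (x ∈ done ++ [v0]))) : Int) := by
      have h1 : M.countP (fun x => decide (x ∈ done ++ [v0])) =
          M.countP (fun x => decide (x ∈ done)) + M.count v0 := by
        rw [List.countP_congr
            (q := fun x => decide (x ∈ done) || decide (x = v0))
            (fun x _ => by simp [List.mem_append]),
          pv_countP_or_disjoint _ _ _ (fun x hx hand =>
            hv0done (by
              obtain ⟨ha, hb⟩ := hand
              simp only [decide_eq_true_eq] at ha hb
              exact hb ▸ ha))]
        congr 1
      rw [hacc, hFR, h1]
      push_cast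
      rfl
    simp only [List.foldl_cons]
    rcases List.mem_cons.mp hv with rfl | hvr
    · rw [pv_below_preserve FR rest _ _ v (fun hh => lt_irrefl v (hv0rest v hh))]
      rw [PySem.Dict.getD_insert, if_pos rfl, hacc]
      congr 1
      exact List.countP_congr (fun x hx => by
        simp only [decide_eq_true_eq]
        exact hmemiff x hx)
    · have hpw' : ((done ++ [v0]) ++ rest).Pairwise (· < ·) := by
        simpa [List.append_assoc] using hpw
      have hall' : ∀ x ∈ M, x ∈ (done ++ [v0]) ++ rest := by
        intro x hx; simpa [List.append_assoc] using hall x hx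
      exact ih (done ++ [v0]) _ _ hpw' hall' hacc' v hvr

-- the correction fold: per-friend delta expressed as two countPs
set_option maxHeartbeats 1000000 in
theorem pv_correct_fold (cnt : PySem.Dict (String × String) Int) (power : PySem.Dict String Int) :
    ∀ (L : List (String × String)), (∀ p ∈ L, p.1 ≠ p.2) → ∀ (sc : PySem.Dict String Int) (f : String),
      (L.foldl (pvCorrect cnt power) sc).getD f 0 =
        sc.getD f 0
        + ((L.countP (fun p => decide ((p.1 = f ∧
              (cnt.getD (p.1, p.2) 0 > cnt.getD (p.2, p.1) 0 ∨
               (cnt.getD (p.1, p.2) 0 = cnt.getD (p.2, p.1) 0 ∧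
                power.getD p.1 0 > power.getD p.2 0))) ∨
            (p.2 = f ∧
              (cnt.getD (p.2, p.1) 0 > cnt.getD (p.1, p.2) 0 ∨
               (cnt.getD (p.2, p.1) 0 = cnt.getD (p.1, p.2) 0 ∧
                power.getD p.2 0 > power.getD p.1 0)))))) : Int)
        - ((L.countP (fun p => decide ((p.1 = f ∧ power.getD p.1 0 > power.getD p.2 0) ∨
            (p.2 = f ∧ power.getD p.2 0 > power.getD p.1 0)))) : Int) := by
  intro L
  induction L with
  | nil => intro _ sc f; simp
  | cons p t ih =>
    intro h sc f
    have hne := h p (by simp)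
    have hstep : (pvCorrect cnt power sc p).getD f 0 = sc.getD f 0
        + (if (p.1 = f ∧
              (cnt.getD (p.1, p.2) 0 > cnt.getD (p.2, p.1) 0 ∨
               (cnt.getD (p.1, p.2) 0 = cnt.getD (p.2, p.1) 0 ∧
                power.getD p.1 0 > power.getD p.2 0))) ∨
            (p.2 = f ∧
              (cnt.getD (p.2, p.1) 0 > cnt.getD (p.1, p.2) 0 ∨
               (cnt.getD (p.2, p.1) 0 = cnt.getD (p.1, p.2) 0 ∧
                power.getD p.2 0 > power.getD p.1 0))) then (1 : Int) else 0)
        - (if (p.1 = f ∧ power.getD p.1 0 > power.getD p.2 0) ∨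
            (p.2 = f ∧ power.getD p.2 0 > power.getD p.1 0) then (1 : Int) else 0) := by
      clear ih h
      by_cases hf1 : p.1 = f <;> by_cases hf2 : p.2 = f
      · exact absurd (hf1.trans hf2.symm) hne
      · subst hf1
        simp only [pvCorrect]
        split_ifs <;> simp_all [PySem.Dict.getD_insert, hne, Ne.symm hne] <;> omega
      · subst hf2
        simp only [pvCorrect]
        split_ifs <;> simp_all [PySem.Dict.getD_insert, hne, Ne.symm hne] <;> omega
      · have hf1' : ¬ (f = p.1) := fun hh => hf1 hh.symm
        have hf2' : ¬ (f = p.2) := fun hh => hf2 hh.symm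
        simp only [pvCorrect]
        split_ifs <;> simp_all [PySem.Dict.getD_insert] <;> omega
    simp only [List.foldl_cons, List.countP_cons]
    rw [ih (fun q hq => h q (by simp [hq])), hstep]
    by_cases hW : (p.1 = f ∧
          (cnt.getD (p.1, p.2) 0 > cnt.getD (p.2, p.1) 0 ∨
           (cnt.getD (p.1, p.2) 0 = cnt.getD (p.2, p.1) 0 ∧
            power.getD p.1 0 > power.getD p.2 0))) ∨
        (p.2 = f ∧
          (cnt.getD (p.2, p.1) 0 > cnt.getD (p.1, p.2) 0 ∨
           (cnt.getD (p.2, p.1) 0 = cnt.getD (p.1, p.2) 0 ∧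
            power.getD p.2 0 > power.getD p.1 0))) <;>
      by_cases hP : (p.1 = f ∧ power.getD p.1 0 > power.getD p.2 0) ∨
          (p.2 = f ∧ power.getD p.2 0 > power.getD p.1 0) <;>
        simp [hW, hP] <;> push_cast <;> ring

-- keys are preserved by the correction fold when both endpoints are already keys
theorem pv_correct_keys (cnt : PySem.Dict (String × String) Int) (power : PySem.Dict String Int) :
    ∀ (L : List (String × String)) (sc : PySem.Dict String Int),
      (∀ p ∈ L, p.1 ∈ sc.keys ∧ p.2 ∈ sc.keys) →
      (L.foldl (pvCorrect cnt power) sc).keys = sc.keys := by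
  intro L
  induction L with
  | nil => intro sc _; rfl
  | cons p t ih =>
    intro sc h
    obtain ⟨h1, h2⟩ := h p (by simp)
    have step : ∀ (d : PySem.Dict String Int), d.keys = sc.keys →
        ∀ (x : String) (v : Int), x ∈ sc.keys → (d.insert x v).keys = sc.keys := by
      intro d hd x v hx
      rw [PySem.Dict.keys_insert_of_contains _ _
        ((PySem.Dict.contains_iff_mem_keys _ _).mpr (hd ▸ hx)), hd]
    have hk : (pvCorrect cnt power sc p).keys = sc.keys := by
      simp only [pvCorrect]
      split_ifs <;>
        repeat' first
          | rfl
          | exact h1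
          | exact h2
          | apply step
    simp only [List.foldl_cons]
    rw [ih _ (fun q hq => by rw [hk]; exact h q (by simp [hq]))]
    exact hk

-- the canonical-pair bijection: counting touched pairs containing f equals counting partners
theorem pv_touch_count (friends gifts : List String) (f : String)
    (hg : ∀ g ∈ gifts, (pvParse g).1 ∈ friends ∧ (pvParse g).2 ∈ friends ∧
          (pvParse g).1 ≠ (pvParse g).2)
    (Q : String → Prop) [DecidablePred Q] :
    ((PySem.List.dedup ((gifts.foldl pvStepCnt PySem.Dict.empty).keys.map
        (fun p => if p.1 < p.2 then p else (p.2, p.1)))).countP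
      (fun p => decide ((p.1 = f ∧ Q p.2) ∨ (p.2 = f ∧ Q p.1))))
    = ((PySem.List.dedup friends).countP (fun b => decide (pvT gifts f b ∧ Q b))) := by
  have hKmem : ∀ q ∈ gifts.map pvParse, q.1 ∈ friends ∧ q.2 ∈ friends ∧ q.1 ≠ q.2 := by
    intro q hq
    obtain ⟨g, hgm, rfl⟩ := List.mem_map.mp hq
    exact hg g hgm
  have hCpos : ∀ a b, ((a, b) ∈ gifts.map pvParse ↔ 0 < pvC gifts a b) := by
    intro a b
    unfold pvC
    constructor
    · intro h; exact_mod_cast List.count_pos_iff.mpr h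
    · intro h; exact List.count_pos_iff.mp (by exact_mod_cast h)
  have hmemL : ∀ p : String × String,
      (p ∈ PySem.List.dedup ((gifts.foldl pvStepCnt PySem.Dict.empty).keys.map
          (fun p => if p.1 < p.2 then p else (p.2, p.1))) ↔
        ∃ q ∈ gifts.map pvParse, (if q.1 < q.2 then q else (q.2, q.1)) = p) := by
    intro p
    rw [PySem.List.mem_dedup, List.mem_map]
    constructor
    · rintro ⟨q, hq, hqe⟩
      rw [pv_cnt_keys, PySem.Set.mem_ofList] at hq
      exact ⟨q, hq, hqe⟩
    · rintro ⟨q, hq, hqe⟩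
      exact ⟨q, by rw [pv_cnt_keys, PySem.Set.mem_ofList]; exact hq, hqe⟩
  have hchar : ∀ a b : String,
      ((a, b) ∈ PySem.List.dedup ((gifts.foldl pvStepCnt PySem.Dict.empty).keys.map
          (fun p => if p.1 < p.2 then p else (p.2, p.1))) ↔ a < b ∧ pvT gifts a b) := by
    intro a b
    rw [hmemL]
    constructor
    · rintro ⟨q, hq, hqe⟩
      obtain ⟨-, -, hne⟩ := hKmem q hq
      have hqC : 0 < pvC gifts q.1 q.2 := (hCpos q.1 q.2).mp (by rwa [Prod.mk.eta])
      by_cases hlt : q.1 < q.2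
      · rw [if_pos hlt] at hqe
        have h1 : q.1 = a := congrArg Prod.fst hqe
        have h2 : q.2 = b := congrArg Prod.snd hqe
        rw [← h1, ← h2]
        exact ⟨hlt, Or.inl hqC⟩
      · rw [if_neg hlt] at hqe
        have h1 : q.2 = a := congrArg Prod.fst hqe
        have h2 : q.1 = b := congrArg Prod.snd hqe
        rw [← h1, ← h2]
        exact ⟨Std.lt_of_le_of_ne hlt (id (Ne.symm hne)), Or.inr hqC⟩
    · rintro ⟨hab, hT | hT⟩
      · exact ⟨(a, b), (hCpos a b).mpr hT, by simp [hab]⟩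
      · refine ⟨(b, a), (hCpos b a).mpr hT, ?_⟩
        have hba : ¬ b < a := lt_asymm hab
        simp [hba]
  have hTf : ∀ a b, pvT gifts a b → a ∈ friends ∧ b ∈ friends ∧ a ≠ b := by
    intro a b hT
    rcases hT with h | h
    · exact hKmem (a, b) ((hCpos a b).mpr h)
    · obtain ⟨h1, h2, h3⟩ := hKmem (b, a) ((hCpos b a).mpr h)
      exact ⟨h2, h1, Ne.symm h3⟩
  have hndT : (PySem.List.dedup ((gifts.foldl pvStepCnt PySem.Dict.empty).keys.map
      (fun p => if p.1 < p.2 then p else (p.2, p.1)))).Nodup := PySem.List.nodup_dedup _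
  have hndU : (PySem.List.dedup friends).Nodup := PySem.List.nodup_dedup _
  rw [List.countP_eq_length_filter, ← List.toFinset_card_of_nodup (hndT.filter _),
    List.toFinset_filter]
  rw [List.countP_eq_length_filter (l := PySem.List.dedup friends),
    ← List.toFinset_card_of_nodup (hndU.filter _), List.toFinset_filter]
  apply Finset.card_bij' (fun p _ => if p.1 = f then p.2 else p.1)
    (fun b _ => if f < b then (f, b) else (b, f))
  · -- hi
    intro p hp
    rw [Finset.mem_filter, List.mem_toFinset] at hp
    obtain ⟨hmem, hP⟩ := hp
    simp only [decide_eq_true_eq] at hP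
    have hab := (hchar p.1 p.2).mp (by rwa [Prod.mk.eta])
    have hne : p.1 ≠ p.2 := ne_of_lt hab.1
    rw [Finset.mem_filter, List.mem_toFinset, PySem.List.mem_dedup]
    by_cases h1 : p.1 = f
    · rcases hP with ⟨-, hQ⟩ | ⟨h2, -⟩
      · rw [if_pos h1]
        have hT : pvT gifts f p.2 := h1 ▸ hab.2
        refine ⟨(hTf f p.2 hT).2.1, ?_⟩
        simp only [decide_eq_true_eq]
        exact ⟨hT, hQ⟩
      · exact absurd (h1.trans h2.symm) hne
    · have h2 : p.2 = f := by
        rcases hP with ⟨h1', -⟩ | ⟨h2, -⟩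
        · exact absurd h1' h1
        · exact h2
      have hQ1 : Q p.1 := by
        rcases hP with ⟨h1', -⟩ | ⟨-, hQ⟩
        · exact absurd h1' h1
        · exact hQ
      rw [if_neg h1]
      have hT : pvT gifts f p.1 := h2 ▸ (Or.symm hab.2)
      refine ⟨(hTf f p.1 hT).2.1, ?_⟩
      simp only [decide_eq_true_eq]
      exact ⟨hT, hQ1⟩
  · -- hj
    intro b hb
    rw [Finset.mem_filter, List.mem_toFinset, PySem.List.mem_dedup] at hb
    obtain ⟨hbu, hTQ⟩ := hb
    simp only [decide_eq_true_eq] at hTQ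
    obtain ⟨hT, hQ⟩ := hTQ
    have hfb : f ≠ b := (hTf f b hT).2.2
    rw [Finset.mem_filter, List.mem_toFinset]
    by_cases hlt : f < b
    · rw [if_pos hlt]
      refine ⟨(hchar f b).mpr ⟨hlt, hT⟩, ?_⟩
      simp [hQ]
    · rw [if_neg hlt]
      have hbf : b < f := Std.lt_of_le_of_ne hlt (id (Ne.symm hfb))
      refine ⟨(hchar b f).mpr ⟨hbf, Or.symm hT⟩, ?_⟩
      simp [hQ]
  · -- left inverse
    intro p hp
    rw [Finset.mem_filter, List.mem_toFinset] at hp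
    obtain ⟨hmem, hP⟩ := hp
    simp only [decide_eq_true_eq] at hP
    have hab := (hchar p.1 p.2).mp (by rwa [Prod.mk.eta])
    by_cases h1 : p.1 = f
    · rw [if_pos h1]
      have : f < p.2 := h1 ▸ hab.1
      rw [if_pos this, ← h1]
    · have h2 : p.2 = f := by
        rcases hP with ⟨h1', -⟩ | ⟨h2, -⟩
        · exact absurd h1' h1
        · exact h2
      rw [if_neg h1]
      have : ¬ f < p.1 := h2 ▸ lt_asymm hab.1
      rw [if_neg this, ← h2]
  · -- right inverse
    intro b hb
    rw [Finset.mem_filter, List.mem_toFinset, PySem.List.mem_dedup] at hb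
    obtain ⟨hbu, hTQ⟩ := hb
    simp only [decide_eq_true_eq] at hTQ
    have hfb : f ≠ b := (hTf f b hTQ.1).2.2
    by_cases hlt : f < b
    · simp [hlt]
    · simp [hlt, Ne.symm hfb]

-- B equals: max over the distinct friends of the same per-friend score
theorem pv_B_eq (friends gifts : List String)
    (hg : ∀ g ∈ gifts, (pvParse g).1 ∈ friends ∧ (pvParse g).2 ∈ friends ∧
          (pvParse g).1 ≠ (pvParse g).2) :
    solution_alt friends gifts =
      ((PySem.Set.ofList friends).map (pvScore friends gifts)).foldl max 0 := by
  unfold solution_alt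
  simp only []
  rw [PySem.List.foldl_prod_mk (f := pvStepCnt) (g := pvStepP)]
  simp only []
  set U := PySem.List.dedup friends with hUdef
  set cntD := gifts.foldl pvStepCnt (PySem.Dict.empty : PySem.Dict (String × String) Int) with hcntdef
  set powerD := gifts.foldl pvStepP
    (U.foldl (fun (d : PySem.Dict String Int) f => d.insert f 0) PySem.Dict.empty) with hpowdef
  have hndU : U.Nodup := PySem.List.nodup_dedup _
  have hUofList : PySem.Set.ofList U = U := PySem.Set.ofList_eq_self_of_nodup _ hndU
  have hpowD : ∀ x, powerD.getD x 0 = pvPw gifts x := by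
    intro x
    rw [hpowdef, pv_pow_fold, pv_getD_foldl_insert U (fun _ => (0 : Int)) 0]
    split_ifs <;> simp [PySem.Dict.getD_empty]
  have hcntD : ∀ a b, cntD.getD (a, b) 0 = pvC gifts a b := by
    intro a b
    rw [hcntdef, pv_cnt_fold, PySem.Dict.getD_empty, zero_add]
    rfl
  simp only [hpowD]
  have hfreq : (U.foldl (fun (d : PySem.Dict Int Int) f =>
      d.insert (pvPw gifts f) (d.getD (pvPw gifts f) 0 + 1)) PySem.Dict.empty)
      = PySem.Dict.counter (U.map (fun f => pvPw gifts f)) := by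
    rw [← PySem.Dict.foldl_insert_getD_add_one_eq_counter, List.foldl_map]
  rw [hfreq, PySem.Dict.keys_counter]
  -- the 'below' table read at pvPw f
  have hbelow : ∀ f ∈ U,
      (((PySem.List.sorted (PySem.Set.ofList (U.map (fun f => pvPw gifts f))) (fun v => v) false).foldl
        (fun (p : PySem.Dict Int Int × Int) v =>
          (p.1.insert v p.2, p.2 + (PySem.Dict.counter (U.map (fun f => pvPw gifts f))).getD v 0))
        (PySem.Dict.empty, 0)).1).getD (pvPw gifts f) 0
      = (((U.map (fun f => pvPw gifts f)).countP (fun x => decide (x < pvPw gifts f))) : Int) := by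
    intro f hf
    have hpair : (([] : List Int) ++ (PySem.List.sorted
        (PySem.Set.ofList (U.map (fun f => pvPw gifts f))) (fun v => v) false)).Pairwise (· < ·) := by
      simpa using PySem.List.sorted_ofList_pairwise_lt (U.map (fun f => pvPw gifts f))
    have hall : ∀ x ∈ U.map (fun f => pvPw gifts f), x ∈ (([] : List Int) ++ (PySem.List.sorted
        (PySem.Set.ofList (U.map (fun f => pvPw gifts f))) (fun v => v) false)) := by
      intro x hx
      simp only [List.nil_append]
      rw [PySem.List.mem_sorted, PySem.Set.mem_ofList]
      exact hx
    have hvmem : pvPw gifts f ∈ PySem.List.sorted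
        (PySem.Set.ofList (U.map (fun f => pvPw gifts f))) (fun v => v) false := by
      rw [PySem.List.mem_sorted, PySem.Set.mem_ofList]
      exact List.mem_map.mpr ⟨f, hf, rfl⟩
    exact pv_below_fold (U.map (fun f => pvPw gifts f))
      (fun v => (PySem.Dict.counter (U.map (fun f => pvPw gifts f))).getD v 0)
      (fun v => PySem.Dict.getD_counter _ _)
      _ [] PySem.Dict.empty 0 hpair hall (by simp) _ hvmem
  -- score0 lookups and keys
  set score0 := U.foldl (fun (d : PySem.Dict String Int) f =>
    d.insert f (((PySem.List.sorted (PySem.Set.ofList (U.map (fun f => pvPw gifts f))) (fun v => v) false).foldl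
        (fun (p : PySem.Dict Int Int × Int) v =>
          (p.1.insert v p.2, p.2 + (PySem.Dict.counter (U.map (fun f => pvPw gifts f))).getD v 0))
        (PySem.Dict.empty, 0)).1.getD (pvPw gifts f) 0)) PySem.Dict.empty with hs0def
  have hscore0 : ∀ f ∈ U, score0.getD f 0
      = (((U.map (fun f => pvPw gifts f)).countP (fun x => decide (x < pvPw gifts f))) : Int) := by
    intro f hf
    rw [hs0def, pv_getD_foldl_insert, if_pos hf]
    exact hbelow f hf
  have hs0keys : score0.keys = U := by
    rw [hs0def, PySem.Dict.keys_foldl_insert, PySem.Dict.keys_empty, PySem.Set.update_nil_left,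
      hUofList]
  -- touched facts
  set touched := PySem.List.dedup (cntD.keys.map (fun p => if p.1 < p.2 then p else (p.2, p.1)))
    with htoudef
  have htou : ∀ p ∈ touched, p.1 ≠ p.2 ∧ p.1 ∈ friends ∧ p.2 ∈ friends := by
    intro p hp
    rw [htoudef, PySem.List.mem_dedup, List.mem_map] at hp
    obtain ⟨q, hq, hqe⟩ := hp
    rw [hcntdef, pv_cnt_keys, PySem.Set.mem_ofList, List.mem_map] at hq
    obtain ⟨g, hgm, rfl⟩ := hq
    obtain ⟨h1, h2, h3⟩ := hg g hgm
    by_cases hlt : (pvParse g).1 < (pvParse g).2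
    · rw [if_pos hlt] at hqe
      rw [← hqe]
      exact ⟨h3, h1, h2⟩
    · rw [if_neg hlt] at hqe
      rw [← hqe]
      exact ⟨Ne.symm h3, h2, h1⟩
  -- per-friend final score
  have hscoref : ∀ f ∈ U,
      (touched.foldl (pvCorrect cntD powerD) score0).getD f 0 = pvScore friends gifts f := by
    intro f hf
    rw [pv_correct_fold cntD powerD touched (fun p hp => (htou p hp).1) score0 f]
    have hWpred : touched.countP (fun p => decide ((p.1 = f ∧
          (cntD.getD (p.1, p.2) 0 > cntD.getD (p.2, p.1) 0 ∨
           (cntD.getD (p.1, p.2) 0 = cntD.getD (p.2, p.1) 0 ∧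
            powerD.getD p.1 0 > powerD.getD p.2 0))) ∨
        (p.2 = f ∧
          (cntD.getD (p.2, p.1) 0 > cntD.getD (p.1, p.2) 0 ∨
           (cntD.getD (p.2, p.1) 0 = cntD.getD (p.1, p.2) 0 ∧
            powerD.getD p.2 0 > powerD.getD p.1 0)))))
        = U.countP (fun b => decide (pvT gifts f b ∧ pvW gifts f b)) := by
      rw [List.countP_congr (q := fun p => decide ((p.1 = f ∧ pvW gifts f p.2) ∨
          (p.2 = f ∧ pvW gifts f p.1))) (fun p _ => by
        simp only [decide_eq_true_eq, hcntD, hpowD]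
        constructor
        · rintro (⟨h, hw⟩ | ⟨h, hw⟩)
          · exact Or.inl ⟨h, h ▸ hw⟩
          · exact Or.inr ⟨h, h ▸ hw⟩
        · rintro (⟨h, hw⟩ | ⟨h, hw⟩)
          · exact Or.inl ⟨h, by rw [h]; exact hw⟩
          · exact Or.inr ⟨h, by rw [h]; exact hw⟩)]
      have htc := pv_touch_count friends gifts f hg (fun b => pvW gifts f b)
      rw [← hcntdef, ← htoudef] at htc
      exact htc
    have hPpred : touched.countP (fun p => decide ((p.1 = f ∧ powerD.getD p.1 0 > powerD.getD p.2 0) ∨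
        (p.2 = f ∧ powerD.getD p.2 0 > powerD.getD p.1 0)))
        = U.countP (fun b => decide (pvT gifts f b ∧ pvPw gifts f > pvPw gifts b)) := by
      rw [List.countP_congr (q := fun p => decide ((p.1 = f ∧ pvPw gifts f > pvPw gifts p.2) ∨
          (p.2 = f ∧ pvPw gifts f > pvPw gifts p.1))) (fun p _ => by
        simp only [decide_eq_true_eq, hpowD]
        constructor
        · rintro (⟨h, hw⟩ | ⟨h, hw⟩)
          · exact Or.inl ⟨h, h ▸ hw⟩
          · exact Or.inr ⟨h, h ▸ hw⟩
        · rintro (⟨h, hw⟩ | ⟨h, hw⟩)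
          · exact Or.inl ⟨h, by rw [h]; exact hw⟩
          · exact Or.inr ⟨h, by rw [h]; exact hw⟩)]
      have htc := pv_touch_count friends gifts f hg (fun b => pvPw gifts f > pvPw gifts b)
      rw [← hcntdef, ← htoudef] at htc
      exact htc
    rw [hWpred, hPpred, hscore0 f hf]
    have hbase : (U.map (fun f => pvPw gifts f)).countP (fun x => decide (x < pvPw gifts f))
        = U.countP (fun b => decide (pvPw gifts b < pvPw gifts f)) := by
      rw [List.countP_map]
      rfl
    rw [hbase]
    -- the counting identity
    have hkey : U.countP (fun b => decide (pvW gifts f b))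
          + U.countP (fun b => decide (pvT gifts f b ∧ pvPw gifts f > pvPw gifts b))
        = U.countP (fun b => decide (pvPw gifts b < pvPw gifts f))
          + U.countP (fun b => decide (pvT gifts f b ∧ pvW gifts f b)) := by
      apply pv_countP_add_pointwise
      intro b _
      by_cases hT : pvT gifts f b
      · by_cases hw : pvW gifts f b <;> by_cases hp : pvPw gifts f > pvPw gifts b <;>
          simp [hT, hw, hp]
      · have hC1 : pvC gifts f b = 0 := by
          have : (0 : Int) ≤ (((gifts.map pvParse).count (f, b) : Nat) : Int) := Int.natCast_nonneg _
          unfold pvT at hT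
          unfold pvC at *
          omega
        have hC2 : pvC gifts b f = 0 := by
          have : (0 : Int) ≤ (((gifts.map pvParse).count (b, f) : Nat) : Int) := Int.natCast_nonneg _
          unfold pvT at hT
          unfold pvC at *
          omega
        have hWiff : pvW gifts f b ↔ pvPw gifts b < pvPw gifts f := by
          unfold pvW
          rw [hC1, hC2]
          constructor
          · rintro (h | ⟨-, h⟩)
            · exact absurd h (lt_irrefl 0)
            · exact h
          · intro h
            exact Or.inr ⟨rfl, h⟩
        by_cases hp : pvPw gifts b < pvPw gifts f
        · simp [hT, hp, hWiff]
        · simp [hT, hp, hWiff]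
    unfold pvScore
    have hUS2 : PySem.Set.ofList friends = U := by rw [hUdef, PySem.List.dedup_eq_ofList]
    rw [hUS2]
    omega
  -- assemble: values, then max
  have hkeys : (touched.foldl (pvCorrect cntD powerD) score0).keys = U := by
    rw [pv_correct_keys cntD powerD touched score0 (fun p hp => by
      rw [hs0keys]
      obtain ⟨-, h1, h2⟩ := htou p hp
      rw [hUdef]
      exact ⟨(PySem.List.mem_dedup _ _).mpr h1, (PySem.List.mem_dedup _ _).mpr h2⟩), hs0keys]
  have hvals : (touched.foldl (pvCorrect cntD powerD) score0).values
      = U.map (fun k => (touched.foldl (pvCorrect cntD powerD) score0).getD k 0) := by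
    rw [PySem.Dict.values_eq_map_keys _ (by rw [hkeys]; exact hndU) 0, hkeys]
  rw [hvals, List.map_congr_left (fun k hk => hscoref k hk)]
  -- maxD over the per-friend scores equals foldl max 0
  have hUS : U = PySem.Set.ofList friends := by rw [hUdef]; simp
  rw [hUS]
  rcases hK : PySem.Set.ofList friends with _ | ⟨v, t⟩
  · simp [PySem.List.maxD, PySem.List.max?]
  · simp only [List.map_cons, PySem.List.maxD, PySem.List.max?_id_cons, Option.getD_some,
      List.foldl_cons]
    have h0 : (0 : Int) ≤ pvScore friends gifts v := by
      unfold pvScore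
      exact Int.natCast_nonneg _
    rw [max_eq_right h0]

theorem pv_main (friends gifts : List String) (hpre : Pre_solution friends gifts) :
    solution friends gifts = solution_alt friends gifts := by
  have hg : ∀ g ∈ gifts, (pvParse g).1 ∈ friends ∧ (pvParse g).2 ∈ friends ∧
      (pvParse g).1 ≠ (pvParse g).2 :=
    fun g hgm => ⟨(hpre g hgm).2.1, (hpre g hgm).2.2.1, (hpre g hgm).2.2.2⟩
  rw [pv_A_eq friends gifts hg, pv_B_eq friends gifts hg]
  apply pv_foldl_max_zero_eq
  intro x
  simp only [List.mem_map, PySem.Set.mem_ofList]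

-- ===== VERDICT (by name: the statement is the Claim_ definition above) =====
theorem solution_spec : Claim_equal_solution := by
  intro friends gifts _ hpre
  unfold Spec_solution
  exact pv_main friends gifts hpre
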